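-- pv_equiv track=rewrite | github.com/koba0384/- | core.py | rotate_edges
-- ===== SOURCE A (Python) =====
-- from typing import Dict, List, Optional, Tuple
--
-- def rotate_edges(edges: Dict[str, str], steps: int) -> Dict[str, str]:
--     steps %= 4
--     new_edges = dict(edges)
--     for _ in range(steps):
--         new_edges = {
--             "N": new_edges["W"],
--             "E": new_edges["N"],
--             "S": new_edges["E"],
--             "W": new_edges["S"],
--         }
--     return new_edges
-- ===== SOURCE B (Python) =====
-- def rotate_edges(edges, steps):
--     steps %= 4
--     if steps == 0:
--         return dict(edges)
--     order = ["N", "E", "S", "W"]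
--     return {order[i]: edges[order[(i - steps) % 4]] for i in range(4)}
-- ===== Notes on version B (the rewrite author's own statement) =====
-- stated objective: simpler
-- what changed: Replaces the repeated single-step permutation loop with one closed-form modular-index rotation over the fixed order ['N','E','S','W'] (copy-only path kept for steps % 4 == 0).
import Mathlib
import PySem

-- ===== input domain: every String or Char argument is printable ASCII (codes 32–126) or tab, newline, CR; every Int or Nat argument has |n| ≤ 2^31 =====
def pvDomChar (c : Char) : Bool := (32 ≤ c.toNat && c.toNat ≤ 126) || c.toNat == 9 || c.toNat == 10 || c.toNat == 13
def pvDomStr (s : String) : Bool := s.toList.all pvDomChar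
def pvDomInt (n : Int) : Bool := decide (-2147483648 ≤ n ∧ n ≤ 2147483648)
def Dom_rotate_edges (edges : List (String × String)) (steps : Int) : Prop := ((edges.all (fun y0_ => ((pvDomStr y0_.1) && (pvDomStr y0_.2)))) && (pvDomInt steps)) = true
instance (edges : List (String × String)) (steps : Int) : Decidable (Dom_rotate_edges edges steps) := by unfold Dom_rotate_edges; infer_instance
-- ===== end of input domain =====

-- B replaces A's repeated one-step permutation loop by a single closed-form modular-index
-- rotation over the fixed order ["N","E","S","W"] (objective: simpler).

-- ===== PORT A =====
-- 'steps %= 4' is Python floor-mod; the result is in [0,4), so '.toNat' of it is exact for 'range(steps)'.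
-- The dict literal looks up "W","N","E","S" in new_edges; a missing key is a KeyError in Python
-- (excluded by Pre_): the match's fallback arm is only reached there.
def rotate_edges (edges : List (String × String)) (steps : Int) : List (String × String) :=
  let s : Nat := (PySem.Int.mod steps 4).toNat
  -- dict(edges): a copy of the dict parameter, i.e. the same association list
  (List.range s).foldl
    (fun d _ =>
      match d.lookup "W", d.lookup "N", d.lookup "E", d.lookup "S" with
      | some w, some n, some e, some sv => [("N", w), ("E", n), ("S", e), ("W", sv)]
      | _, _, _, _ => d)  -- KeyError in Python: unreachable under Pre_
    edges

-- ===== PORT B =====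
-- edges[order[(i - steps) % 4]]: a missing key is a KeyError in Python (excluded by Pre_);
-- the port yields "" there, an input region on which nothing is claimed.
def rotate_edges_alt (edges : List (String × String)) (steps : Int) : List (String × String) :=
  let s : Int := PySem.Int.mod steps 4
  if s = 0 then edges  -- dict(edges): a copy of the dict parameter
  else
    let order : List String := ["N", "E", "S", "W"]
    (List.range 4).map (fun i =>
      (order.getD i "",
       ((edges.lookup (order.getD (PySem.Int.mod ((i : Int) - s) 4).toNat "")).getD "")))

-- ===== PRECONDITION & SPEC =====
-- Pre_ excludes exactly the inputs where Python A raises KeyError: steps % 4 ≠ 0 with one of the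
-- four direction keys absent from edges.
def Pre_rotate_edges (edges : List (String × String)) (steps : Int) : Prop :=
  PySem.Int.mod steps 4 = 0 ∨
    ((edges.lookup "N").isSome ∧ (edges.lookup "E").isSome ∧
     (edges.lookup "S").isSome ∧ (edges.lookup "W").isSome)
instance (edges : List (String × String)) (steps : Int) : Decidable (Pre_rotate_edges edges steps) := by
  unfold Pre_rotate_edges; infer_instance

def pvWitness_rotate_edges : (List (String × String)) × Int :=
  ([("N", "a"), ("E", "b"), ("S", "c"), ("W", "d")], 3)

def Spec_rotate_edges (edges : List (String × String)) (steps : Int) (out : List (String × String)) : Prop := out = rotate_edges_alt edges steps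
instance (edges : List (String × String)) (steps : Int) (out : List (String × String)) : Decidable (Spec_rotate_edges edges steps out) := by unfold Spec_rotate_edges; infer_instance

-- ===== CLAIM (what is proved, stated in full; the proofs are below) =====
def Claim_equal_rotate_edges : Prop := ∀ (edges : List (String × String)) (steps : Int), Dom_rotate_edges edges steps → Pre_rotate_edges edges steps → Spec_rotate_edges edges steps (rotate_edges edges steps)

-- ===== LEMMAS AND PROOFS =====

-- ===== VERDICT (by name: the statement is the Claim_ definition above) =====
theorem rotate_edges_spec : Claim_equal_rotate_edges := by
  intro edges steps _ hpre
  unfold Spec_rotate_edges rotate_edges rotate_edges_alt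
  have h0 : 0 ≤ PySem.Int.mod steps 4 := PySem.Int.mod_nonneg steps (by norm_num)
  have h4 : PySem.Int.mod steps 4 < 4 := PySem.Int.mod_lt steps (by norm_num)
  rcases hpre with hz | ⟨hn, he, hs, hw⟩
  · have hz' : steps % 4 = 0 := by
      rw [← PySem.Int.mod_eq_emod_of_pos (by norm_num)]; exact hz
    simp [hz']
  · obtain ⟨n, hn⟩ := Option.isSome_iff_exists.mp hn
    obtain ⟨e, he⟩ := Option.isSome_iff_exists.mp he
    obtain ⟨sv, hs⟩ := Option.isSome_iff_exists.mp hs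
    obtain ⟨w, hw⟩ := Option.isSome_iff_exists.mp hw
    interval_cases h : (PySem.Int.mod steps 4) <;>
      simp [hn, he, hs, hw, List.range_succ, List.lookup]
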